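-- pv_equiv track=rewrite | github.com/PacketHelper/packet-helper-next | backend/packet_server/utils/utils.py | hex_str_operation
-- ===== SOURCE A (Python) =====
-- def hex_str_operation(h_string, with_new_line: bool = False):
--     z = ""
--     tmp = []
--     for e, x in enumerate(h_string.replace(" ", "")):
--         z += x
--         if e % 2:
--             tmp.append(z)
--             z = ""
--     if with_new_line:
--         temp_list = []
--         for e, v in enumerate(tmp, 1):
--             if not e % 16:
--                 temp_list.append(f"{v}\n")
--                 continue
--             temp_list.append(f"{v} ")
--         return "".join(temp_list)
--     return " ".join(tmp)
-- ===== SOURCE B (Python) =====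
-- def hex_str_operation(h_string, with_new_line: bool = False):
--     s = h_string.replace(" ", "")
--     # build the byte-pair list first (an odd trailing character is dropped)
--     pairs = []
--     i = 0
--     while i + 1 < len(s):
--         pairs.append(s[i] + s[i + 1])
--         i += 2
--     if not with_new_line:
--         return " ".join(pairs)
--     # partition the pairs into rows of 16 and terminate each row
--     rows = []
--     for r in range(0, len(pairs), 16):
--         row = pairs[r:r + 16]
--         rows.append(" ".join(row) + ("\n" if len(row) == 16 else " "))
--     return "".join(rows)
-- ===== Notes on version B (the rewrite author's own statement) =====
-- stated objective: alternative
-- what changed: B builds the byte-pair list up front (two characters at a time) and, for with_new_line, partitions the pairs into rows of 16 and emits each row as a single ' '.join plus its terminator, replacing A's flat single-pass enumerate loop with its e%2 character accumulator and e%16 suffix test.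
import Mathlib
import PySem

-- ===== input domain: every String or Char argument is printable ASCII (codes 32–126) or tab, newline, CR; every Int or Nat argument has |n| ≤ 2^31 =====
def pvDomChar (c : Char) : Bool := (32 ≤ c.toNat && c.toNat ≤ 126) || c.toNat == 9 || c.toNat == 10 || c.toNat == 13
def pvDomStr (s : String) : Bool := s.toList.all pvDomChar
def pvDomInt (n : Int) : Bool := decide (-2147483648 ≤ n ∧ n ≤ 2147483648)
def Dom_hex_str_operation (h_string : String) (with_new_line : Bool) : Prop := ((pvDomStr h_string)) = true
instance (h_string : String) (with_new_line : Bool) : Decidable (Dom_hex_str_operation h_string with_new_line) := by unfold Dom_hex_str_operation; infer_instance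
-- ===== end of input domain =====

-- B groups the hex string into byte pairs first and row-chunks them for the newline form; same output, different decomposition (objective: alternative).

-- ===== PORT A =====
-- loop body of A's first for-loop: z += x; if e % 2: tmp.append(z); z = ""
def pvStepA (st : List Char × List (List Char)) (p : Int × Char) : List Char × List (List Char) :=
  let z := st.1 ++ [p.2]
  if PySem.Int.mod p.1 2 ≠ 0 then ([], st.2 ++ [z]) else (z, st.2)

-- loop body of A's second for-loop over enumerate(tmp, 1)
def pvStepNL (acc : List (List Char)) (p : Int × List Char) : List (List Char) :=
  if PySem.Int.mod p.1 16 = 0 then acc ++ [p.2 ++ ['\n']] else acc ++ [p.2 ++ [' ']]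

def hex_str_operation (h_string : String) (with_new_line : Bool) : String :=
  let chars := (PySem.Str.replace h_string " " "").toList
  let st := (PySem.List.enumerate chars).foldl pvStepA ([], [])
  let tmp := st.2
  if with_new_line then
    let temp_list := (PySem.List.enumerate tmp 1).foldl pvStepNL []
    String.ofList (PySem.Chars.join [] temp_list)
  else
    String.ofList (PySem.Chars.join [' '] tmp)

-- ===== PORT B =====
-- while i + 1 < len(s): pairs.append(s[i] + s[i+1]); i += 2   (index walk = two-at-a-time walk)
def pvPairs : List Char → List (List Char)
  | a :: b :: t => [a, b] :: pvPairs t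
  | _ => []

-- for r in range(0, len(pairs), 16): row = pairs[r:r+16]; rows.append(" ".join(row) + ("\n" if len(row) == 16 else " "))
def pvRows : List (List Char) → List (List Char)
  | [] => []
  | a :: t =>
    (PySem.Chars.join [' '] ((a :: t).take 16) ++
      (if ((a :: t).take 16).length = 16 then ['\n'] else [' '])) :: pvRows ((a :: t).drop 16)
termination_by l => l.length
decreasing_by simp

def hex_str_operation_alt (h_string : String) (with_new_line : Bool) : String :=
  let s := (PySem.Str.replace h_string " " "").toList
  let pairs := pvPairs s
  if !with_new_line then
    String.ofList (PySem.Chars.join [' '] pairs)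
  else
    String.ofList (PySem.Chars.join [] (pvRows pairs))

-- ===== PRECONDITION & SPEC =====
def Spec_hex_str_operation (h_string : String) (with_new_line : Bool) (out : String) : Prop := out = hex_str_operation_alt h_string with_new_line
instance (h_string : String) (with_new_line : Bool) (out : String) : Decidable (Spec_hex_str_operation h_string with_new_line out) := by unfold Spec_hex_str_operation; infer_instance

-- ===== CLAIM (what is proved, stated in full; the proofs are below) =====
def Claim_equal_hex_str_operation : Prop := ∀ (h_string : String) (with_new_line : Bool), Dom_hex_str_operation h_string with_new_line → Spec_hex_str_operation h_string with_new_line (hex_str_operation h_string with_new_line)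

-- ===== LEMMAS AND PROOFS =====

theorem pv_mod_natCast' (m k : Nat) (i : Int) (h : i = (k : Int)) :
    PySem.Int.mod (m : Int) i = ((m % k : Nat) : Int) := by
  subst h; exact_mod_cast PySem.Int.mod_natCast m k

-- A's first loop, entered at an even index with z = "", flushes exactly the byte pairs.
theorem pv_foldA (l : List Char) : ∀ (k : Nat) (acc : List (List Char)),
    ((PySem.List.enumerate l ((2 * k : Nat) : Int)).foldl pvStepA ([], acc)).2
      = acc ++ pvPairs l := by
  induction l using pvPairs.induct with
  | case1 a b t ih =>
    intro k acc
    rw [PySem.List.enumerate_cons, PySem.List.enumerate_cons]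
    have h1 : ((2 * k : Nat) : Int) + 1 = ((2 * k + 1 : Nat) : Int) := by push_cast; ring
    have h2 : ((2 * k + 1 : Nat) : Int) + 1 = ((2 * (k + 1) : Nat) : Int) := by push_cast; ring
    rw [h1, h2]
    simp only [List.foldl_cons]
    have e1 : pvStepA ([], acc) ((2 * k : Nat), a) = ([a], acc) := by
      simp [pvStepA]
    have e2 : pvStepA ([a], acc) ((2 * k + 1 : Nat), b) = ([], acc ++ [[a, b]]) := by
      simp [pvStepA]
    rw [e1, e2, ih (k + 1) (acc ++ [[a, b]])]
    simp [pvPairs]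
  | case2 l h =>
    intro k acc
    match l, h with
    | [], _ => simp [pvPairs, PySem.List.enumerate_nil]
    | [a], _ =>
      rw [PySem.List.enumerate_cons, PySem.List.enumerate_nil]
      simp only [List.foldl_cons, List.foldl_nil]
      have e1 : pvStepA ([], acc) ((2 * k : Nat), a) = ([a], acc) := by
        simp [pvStepA]
      rw [e1]; simp [pvPairs]
    | a :: b :: r, h => exact absurd rfl (h a b r)

-- the suffix function of A's newline loop
def pvSep (p : Int × List Char) : List Char :=
  if PySem.Int.mod p.1 16 = 0 then p.2 ++ ['\n'] else p.2 ++ [' ']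

theorem pv_foldNL (l : List (Int × List Char)) : ∀ (acc : List (List Char)),
    l.foldl pvStepNL acc = acc ++ l.map pvSep := by
  induction l with
  | nil => simp
  | cons p t ih =>
    intro acc
    simp only [List.foldl_cons, List.map_cons]
    rw [ih]
    simp only [pvStepNL, pvSep]
    split <;> simp

theorem pv_join_nil_flatten (l : List (List Char)) : PySem.Chars.join [] l = l.flatten := by
  induction l with
  | nil => rw [PySem.Chars.join_nil, List.flatten_nil]
  | cons a t ih =>
    cases t with
    | nil => rw [PySem.Chars.join_singleton]; simp
    | cons b r => rw [PySem.Chars.join_cons_cons, List.flatten_cons, ih, List.append_nil]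

-- a row that never reaches a multiple-of-16 index: every pair gets a trailing space
theorem pv_row_short (row : List (List Char)) : ∀ (k j : Nat), 1 ≤ j → j + row.length ≤ 16 → row ≠ [] →
    ((PySem.List.enumerate row ((16 * k + j : Nat) : Int)).map pvSep).flatten
      = PySem.Chars.join [' '] row ++ [' '] := by
  induction row with
  | nil => intro k j _ _ h; exact absurd rfl h
  | cons a t ih =>
    intro k j hj hle _
    have hlen1 : 1 ≤ (a :: t).length := by simp
    have hjlt : j < 16 := by omega
    rw [PySem.List.enumerate_cons]
    have h1 : ((16 * k + j : Nat) : Int) + 1 = ((16 * k + (j + 1) : Nat) : Int) := by push_cast; ring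
    rw [h1]
    simp only [List.map_cons, List.flatten_cons]
    have hsep : pvSep ((16 * k + j : Nat), a) = a ++ [' '] := by
      simp only [pvSep]
      rw [pv_mod_natCast' (16 * k + j) 16 16 (by norm_num), if_neg]
      have : (16 * k + j) % 16 ≠ 0 := by omega
      exact_mod_cast this
    rw [hsep]
    cases t with
    | nil =>
      simp [PySem.List.enumerate_nil, PySem.Chars.join_singleton]
    | cons b r =>
      rw [ih k (j + 1) (by omega) (by simp at hle ⊢; omega) (by simp),
        PySem.Chars.join_cons_cons]
      simp

-- a row whose last pair sits at an index divisible by 16: it gets the newline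
theorem pv_row_full (row : List (List Char)) : ∀ (k j : Nat), 1 ≤ j → j + row.length = 17 → row ≠ [] →
    ((PySem.List.enumerate row ((16 * k + j : Nat) : Int)).map pvSep).flatten
      = PySem.Chars.join [' '] row ++ ['\n'] := by
  induction row with
  | nil => intro k j _ _ h; exact absurd rfl h
  | cons a t ih =>
    intro k j hj hlen _
    have hlen1 : (a :: t).length = 1 + t.length := by simp; omega
    rw [PySem.List.enumerate_cons]
    have h1 : ((16 * k + j : Nat) : Int) + 1 = ((16 * k + (j + 1) : Nat) : Int) := by push_cast; ring
    rw [h1]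
    simp only [List.map_cons, List.flatten_cons]
    cases t with
    | nil =>
      have hj16 : j = 16 := by simp at hlen; omega
      subst hj16
      have hsep : pvSep ((16 * k + 16 : Nat), a) = a ++ ['\n'] := by
        simp only [pvSep]
        rw [pv_mod_natCast' (16 * k + 16) 16 16 (by norm_num), if_pos]
        have : (16 * k + 16) % 16 = 0 := by omega
        exact_mod_cast this
      rw [hsep]
      simp [PySem.List.enumerate_nil, PySem.Chars.join_singleton]
    | cons b r =>
      have hjlt : j < 16 := by simp at hlen; omega
      have hsep : pvSep ((16 * k + j : Nat), a) = a ++ [' '] := by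
        simp only [pvSep]
        rw [pv_mod_natCast' (16 * k + j) 16 16 (by norm_num), if_neg]
        have : (16 * k + j) % 16 ≠ 0 := by omega
        exact_mod_cast this
      rw [hsep, ih k (j + 1) (by omega) (by simp at hlen ⊢; omega) (by simp),
        PySem.Chars.join_cons_cons]
      simp

-- chunking into rows of 16 agrees with the flat indexed suffix map, for any 16-aligned start
theorem pv_rows_eq (n : Nat) : ∀ (p : List (List Char)), p.length ≤ n → ∀ (k : Nat),
    ((PySem.List.enumerate p ((16 * k + 1 : Nat) : Int)).map pvSep).flatten
      = (pvRows p).flatten := by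
  induction n with
  | zero =>
    intro p hp k
    have : p = [] := List.length_eq_zero_iff.mp (by omega)
    subst this
    simp [pvRows, PySem.List.enumerate_nil]
  | succ n ih =>
    intro p hp k
    cases hp0 : p with
    | nil => simp [pvRows, PySem.List.enumerate_nil]
    | cons a t =>
      rw [← hp0]
      have hpne : p ≠ [] := by rw [hp0]; simp
      have hp1 : 1 ≤ p.length := by rw [hp0]; simp
      have hsplit : p = p.take 16 ++ p.drop 16 := (List.take_append_drop 16 p).symm
      conv_lhs => rw [hsplit]
      rw [PySem.List.enumerate_append, List.map_append, List.flatten_append]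
      have hrows : pvRows p = (PySem.Chars.join [' '] (p.take 16) ++
          (if (p.take 16).length = 16 then ['\n'] else [' '])) :: pvRows (p.drop 16) := by
        rw [hp0]; rw [pvRows]
      rw [hrows, List.flatten_cons]
      by_cases hlen : p.length ≤ 16
      · have hdrop : p.drop 16 = [] := by
          apply List.drop_eq_nil_of_le; omega
        have htake : p.take 16 = p := List.take_of_length_le (by omega)
        rw [hdrop, htake, pvRows, List.flatten_nil, List.append_nil,
          PySem.List.enumerate_nil, List.map_nil, List.flatten_nil, List.append_nil]
        by_cases h16 : p.length = 16
        · rw [if_pos h16]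
          exact pv_row_full p k 1 (by omega) (by omega) hpne
        · rw [if_neg h16]
          exact pv_row_short p k 1 (by omega) (by omega) hpne
      · have htlen : (p.take 16).length = 16 := by simp; omega
        have htne : p.take 16 ≠ [] := by
          intro hc; rw [hc] at htlen; simp at htlen
        have hfull : ((PySem.List.enumerate (p.take 16) ((16 * k + 1 : Nat) : Int)).map pvSep).flatten
            = PySem.Chars.join [' '] (p.take 16) ++ ['\n'] :=
          pv_row_full (p.take 16) k 1 (by omega) (by omega) htne
        have hstart : ((16 * k + 1 : Nat) : Int) + ((p.take 16).length : Int)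
            = ((16 * (k + 1) + 1 : Nat) : Int) := by
          rw [htlen]; push_cast; ring
        rw [hstart, hfull, if_pos htlen, ih (p.drop 16) (by simp; omega) (k + 1)]

-- ===== VERDICT (by name: the statement is the Claim_ definition above) =====
theorem hex_str_operation_spec : Claim_equal_hex_str_operation := by
  intro h_string with_new_line _
  unfold Spec_hex_str_operation hex_str_operation hex_str_operation_alt
  have hpairs : ∀ cs : List Char,
      ((PySem.List.enumerate cs).foldl pvStepA ([], [])).2 = pvPairs cs := by
    intro cs
    simpa using pv_foldA cs 0 []
  cases with_new_line with
  | false =>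
    show String.ofList (PySem.Chars.join [' ']
        ((PySem.List.enumerate ((PySem.Str.replace h_string " " "").toList)).foldl pvStepA ([], [])).2)
      = String.ofList (PySem.Chars.join [' '] (pvPairs ((PySem.Str.replace h_string " " "").toList)))
    rw [hpairs]
  | true =>
    show String.ofList (PySem.Chars.join []
        ((PySem.List.enumerate (((PySem.List.enumerate ((PySem.Str.replace h_string " " "").toList)).foldl
            pvStepA ([], [])).2) 1).foldl pvStepNL []))
      = String.ofList (PySem.Chars.join []
          (pvRows (pvPairs ((PySem.Str.replace h_string " " "").toList))))
    rw [hpairs, pv_foldNL, List.nil_append, pv_join_nil_flatten, pv_join_nil_flatten]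
    refine congrArg String.ofList ?_
    have := pv_rows_eq (pvPairs ((PySem.Str.replace h_string " " "").toList)).length
      (pvPairs ((PySem.Str.replace h_string " " "").toList)) (le_refl _) 0
    simpa using this
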